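-- pv_equiv track=rewrite | github.com/rynorris/adventofcode | 2019/python/day4.py | has_dupe
-- ===== SOURCE A (Python) =====
-- def has_dupe(s):
--     for ix in range(len(s) - 1):
--         if s[ix] == s[ix + 1]:
--             if ix > 0 and s[ix-1] == s[ix]:
--                 continue
--             if ix < len(s) - 2 and s[ix+2] == s[ix]:
--                 continue
--             return True
--     return False
-- ===== SOURCE B (Python) =====
-- def has_dupe(s):
--     # Run-length scan: true iff some maximal run of equal chars has length exactly 2.
--     prev = None
--     run = 0
--     for c in s:
--         if c == prev:
--             run += 1
--         else:
--             if run == 2: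
--                 return True
--             prev = c
--             run = 1
--     return run == 2
-- ===== Notes on version B (the rewrite author's own statement) =====
-- stated objective: simpler
-- what changed: Replaced A's per-index pair test with look-back s[ix-1] and look-ahead s[ix+2] neighbour checks by a single run-length scan that tracks the current character and its run count and reports a run of length exactly 2 at each run boundary and at the end.
import Mathlib
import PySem

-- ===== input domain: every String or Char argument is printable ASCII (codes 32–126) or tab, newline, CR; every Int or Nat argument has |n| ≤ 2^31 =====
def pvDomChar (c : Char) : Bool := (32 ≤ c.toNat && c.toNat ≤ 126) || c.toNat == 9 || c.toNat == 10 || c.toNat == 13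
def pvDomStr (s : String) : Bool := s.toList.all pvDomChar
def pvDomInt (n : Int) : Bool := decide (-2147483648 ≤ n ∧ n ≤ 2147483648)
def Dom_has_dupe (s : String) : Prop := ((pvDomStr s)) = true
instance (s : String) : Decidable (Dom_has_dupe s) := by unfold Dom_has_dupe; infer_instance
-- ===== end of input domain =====

-- B replaces A's per-index look-back/look-ahead neighbour checks with a single
-- run-length scan (objective: simpler/idiomatic; same O(n) cost).

-- ===== PORT A =====
-- A: for ix in range(len(s)-1): if s[ix]==s[ix+1], skip if the pair extends a longer
-- run (look-back s[ix-1] / look-ahead s[ix+2]), else return True; False after the loop.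
-- Every index A reads is in range, so List.getD is an exact rendering of s[...].
-- fuel = number of remaining loop steps, a pure totality device (fuel ≥ len(s)-1-ix,
-- so the loop always ends by the range bound, exactly as in Python).
def hasDupeLoopA (cs : List Char) (fuel ix : Nat) : Bool :=
  match fuel with
  | 0 => false
  | fuel + 1 =>
    if ix < cs.length - 1 then
      if cs.getD ix ' ' = cs.getD (ix + 1) ' ' then
        if ix > 0 ∧ cs.getD (ix - 1) ' ' = cs.getD ix ' ' then
          hasDupeLoopA cs fuel (ix + 1)                -- continue
        else if ix < cs.length - 2 ∧ cs.getD (ix + 2) ' ' = cs.getD ix ' ' then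
          hasDupeLoopA cs fuel (ix + 1)                -- continue
        else true
      else hasDupeLoopA cs fuel (ix + 1)
    else false

def has_dupe (s : String) : Bool := hasDupeLoopA s.toList s.toList.length 0

-- ===== PORT B =====
-- B: maintain (prev, run); at each run boundary (and at the end) test run == 2.
def runLoopB (cs : List Char) (prev : Option Char) (run : Nat) : Bool :=
  match cs with
  | [] => run == 2
  | c :: rest =>
    if some c = prev then runLoopB rest prev (run + 1)
    else if run == 2 then true
    else runLoopB rest (some c) 1

def has_dupe_alt (s : String) : Bool := runLoopB s.toList none 0

-- ===== PRECONDITION & SPEC =====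
def Spec_has_dupe (s : String) (out : Bool) : Prop := out = has_dupe_alt s
instance (s : String) (out : Bool) : Decidable (Spec_has_dupe s out) := by unfold Spec_has_dupe; infer_instance

-- ===== CLAIM (what is proved, stated in full; the proofs are below) =====
def Claim_equal_has_dupe : Prop := ∀ (s : String), Dom_has_dupe s → Spec_has_dupe s (has_dupe s)

-- ===== LEMMAS AND PROOFS =====

-- Window form of A's loop: prev = previous character (if any), l = remaining suffix.
def wLoop (prev : Option Char) (l : List Char) : Bool :=
  match l with
  | a :: b :: rest =>
    if a = b then
      if prev = some a then wLoop (some a) (b :: rest)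
      else
        match rest with
        | [] => true
        | c :: _ => if c = a then wLoop (some a) (b :: rest) else true
    else wLoop (some a) (b :: rest)
  | _ => false

lemma wLoop_cons2 (prev : Option Char) (a b : Char) (rest : List Char) :
    wLoop prev (a :: b :: rest) =
      if a = b then
        if prev = some a then wLoop (some a) (b :: rest)
        else
          match rest with
          | [] => true
          | c :: _ => if c = a then wLoop (some a) (b :: rest) else true
      else wLoop (some a) (b :: rest) := rfl

lemma wLoop_cons3 (prev : Option Char) (a b c : Char) (rest : List Char) :
    wLoop prev (a :: b :: c :: rest) =
      if a = b then
        if prev = some a then wLoop (some a) (b :: c :: rest)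
        else if c = a then wLoop (some a) (b :: c :: rest) else true
      else wLoop (some a) (b :: c :: rest) := rfl

lemma wLoop_cons2_nil (prev : Option Char) (a b : Char) :
    wLoop prev [a, b] =
      if a = b then
        if prev = some a then wLoop (some a) [b] else true
      else wLoop (some a) [b] := rfl

lemma wLoop_short (p : Option Char) (l : List Char) (h : l.length ≤ 1) :
    wLoop p l = false := by
  match l with
  | [] => rfl
  | [a] => rfl
  | a :: b :: rest => simp at h

-- Canonical run-length recursion: true iff some maximal run has length exactly 2.
def gRuns (l : List Char) : Bool :=
  match l with
  | [] => false
  | c :: rest =>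
    if (rest.takeWhile (· = c)).length = 1 then true
    else gRuns (rest.drop (rest.takeWhile (· = c)).length)
termination_by l.length
decreasing_by
  have h1 : (List.drop (rest.takeWhile (· = c)).length rest).length ≤ rest.length := by
    simp [List.length_drop]
  simp only [List.length_cons]; omega

lemma gRuns_nil : gRuns [] = false := by rw [gRuns]

lemma gRuns_cons (c : Char) (rest : List Char) :
    gRuns (c :: rest) =
      if (rest.takeWhile (· = c)).length = 1 then true
      else gRuns (rest.drop (rest.takeWhile (· = c)).length) := by rw [gRuns]

lemma wLoop_irrel (p : Char) (l : List Char) (h : l.head? ≠ some p) :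
    wLoop (some p) l = wLoop none l := by
  match l with
  | [] => rfl
  | [a] => rfl
  | a :: b :: rest =>
    have hpa : ¬ ((some p : Option Char) = some a) := by
      simp only [List.head?] at h; simp_all [eq_comm]
    rw [wLoop_cons2, wLoop_cons2]
    simp [hpa]

lemma wLoop_run (a : Char) (rest : List Char) :
    wLoop (some a) (a :: rest) =
      wLoop none (rest.drop (rest.takeWhile (· = a)).length) := by
  induction rest with
  | nil => rfl
  | cons c rest' ih =>
    by_cases hc : c = a
    · subst hc
      have h1 : wLoop (some c) (c :: c :: rest') = wLoop (some c) (c :: rest') := by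
        rw [wLoop_cons2]; simp
      rw [h1, ih]
      simp
    · have h1 : wLoop (some a) (a :: c :: rest') = wLoop (some a) (c :: rest') := by
        rw [wLoop_cons2]; simp
      rw [h1, wLoop_irrel a (c :: rest') (by simp [hc])]
      simp [hc]

lemma wLoop_none_eq_gRuns_aux (n : Nat) :
    ∀ l : List Char, l.length ≤ n → wLoop none l = gRuns l := by
  induction n with
  | zero =>
    intro l hl
    have : l = [] := List.length_eq_zero_iff.mp (Nat.le_zero.mp hl)
    subst this; rw [gRuns_nil]; rfl
  | succ n ih =>
    intro l hl
    match l with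
    | [] => rw [gRuns_nil]; rfl
    | [a] =>
      rw [gRuns_cons]
      simp [wLoop, gRuns_nil]
    | a :: b :: rest =>
      by_cases hab : a = b
      · subst hab
        match rest with
        | [] =>
          rw [wLoop_cons2, gRuns_cons]
          simp
        | c :: rest' =>
          by_cases hc : c = a
          · subst hc
            have hstep : wLoop none (c :: c :: c :: rest') = wLoop (some c) (c :: c :: rest') := by
              rw [wLoop_cons2]; simp
            rw [hstep, wLoop_run,
                List.takeWhile_cons_of_pos (by simp), List.length_cons,
                List.drop_succ_cons]
            have hlen : (rest'.drop (rest'.takeWhile (· = c)).length).length ≤ n := by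
              have : (rest'.drop (rest'.takeWhile (· = c)).length).length = rest'.length - (rest'.takeWhile (· = c)).length := List.length_drop
              simp only [List.length_cons] at hl
              omega
            rw [ih _ hlen, gRuns_cons]
            have htw : ((c :: c :: rest').takeWhile (· = c))
                = c :: c :: rest'.takeWhile (· = c) := by
              simp
            rw [htw]
            simp
          · rw [wLoop_cons2, gRuns_cons]
            simp [hc]
      · rw [wLoop_cons2, if_neg hab,
            wLoop_irrel a (b :: rest) (by simp; exact fun h => hab h.symm),
            ih (b :: rest) (by simp at hl ⊢; omega), gRuns_cons a (b :: rest),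
            List.takeWhile_cons_of_neg (by simp; exact fun h => hab h.symm)]
        simp

lemma wLoop_none_eq_gRuns (l : List Char) : wLoop none l = gRuns l :=
  wLoop_none_eq_gRuns_aux l.length l le_rfl

-- B side: the run counter state, characterised by takeWhile.
lemma runLoopB_run (cs : List Char) : ∀ (p : Char) (r : Nat),
    runLoopB cs (some p) r =
      if r + (cs.takeWhile (· = p)).length = 2 then true
      else gRuns (cs.drop (cs.takeWhile (· = p)).length) := by
  induction cs with
  | nil =>
    intro p r
    by_cases hr : r = 2 <;> simp [runLoopB, gRuns_nil, hr]
  | cons c rest ih =>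
    intro p r
    by_cases hc : c = p
    · subst hc
      rw [show runLoopB (c :: rest) (some c) r = runLoopB rest (some c) (r + 1) by
        simp [runLoopB]]
      rw [ih, List.takeWhile_cons_of_pos (by simp), List.length_cons,
          List.drop_succ_cons,
          show r + ((rest.takeWhile (· = c)).length + 1)
            = r + 1 + (rest.takeWhile (· = c)).length from by omega]
    · have h1 : runLoopB (c :: rest) (some p) r
          = if r == 2 then true else runLoopB rest (some c) 1 := by
        simp [runLoopB, hc]
      rw [h1, ih]
      rw [List.takeWhile_cons_of_neg (by simp [hc])]
      simp only [List.length_nil, Nat.add_zero, List.drop_zero]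
      rw [gRuns_cons]
      by_cases hr : r = 2
      · simp [hr]
      · have : (r == 2) = false := by simp [hr]
        simp only [this, if_neg hr, Bool.false_eq_true, if_false]
        by_cases h2 : (rest.takeWhile (· = c)).length = 1
        · simp [h2]
        · have : ¬ (1 + (rest.takeWhile (· = c)).length = 2) := by omega
          simp [this, h2]

lemma runLoopB_eq_gRuns (cs : List Char) : runLoopB cs none 0 = gRuns cs := by
  match cs with
  | [] => rw [gRuns_nil]; rfl
  | c :: rest =>
    have h1 : runLoopB (c :: rest) none 0 = runLoopB rest (some c) 1 := by
      simp [runLoopB]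
    rw [h1, runLoopB_run, gRuns_cons]
    by_cases h2 : (rest.takeWhile (· = c)).length = 1
    · simp [h2]
    · have : ¬ (1 + (rest.takeWhile (· = c)).length = 2) := by omega
      simp [this, h2]

-- A side: the index loop equals the window form on the remaining suffix.
lemma bridgeA (n : Nat) : ∀ (cs : List Char) (ix : Nat), cs.length - 1 - ix ≤ n → ix ≤ cs.length →
    hasDupeLoopA cs n ix
      = wLoop (if ix = 0 then none else cs[ix - 1]?) (cs.drop ix) := by
  induction n with
  | zero =>
    intro cs ix h1 h2
    rw [show hasDupeLoopA cs 0 ix = false from rfl,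
        wLoop_short _ _ (by simp [List.length_drop]; omega)]
  | succ n ih =>
    intro cs ix h1 h2
    by_cases hlt : ix < cs.length - 1
    · have hix : ix < cs.length := by omega
      have hix1 : ix + 1 < cs.length := by omega
      have hIH : hasDupeLoopA cs n (ix + 1) = wLoop (some cs[ix]) (cs.drop (ix + 1)) := by
        rw [ih cs (ix + 1) (by omega) (by omega), if_neg (by omega)]
        simp only [Nat.add_sub_cancel, List.getElem?_eq_getElem hix]
      have hback : (ix > 0 ∧ cs.getD (ix - 1) ' ' = cs[ix])
          ↔ ((if ix = 0 then none else cs[ix - 1]?) = some cs[ix]) := by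
        by_cases h0 : ix = 0
        · simp [h0]
        · have hm : ix - 1 < cs.length := by omega
          rw [if_neg h0, List.getElem?_eq_getElem hm, List.getD_eq_getElem _ _ hm]
          simp [Nat.pos_of_ne_zero h0]
      rw [show hasDupeLoopA cs (n + 1) ix
            = if ix < cs.length - 1 then
                if cs.getD ix ' ' = cs.getD (ix + 1) ' ' then
                  if ix > 0 ∧ cs.getD (ix - 1) ' ' = cs.getD ix ' ' then
                    hasDupeLoopA cs n (ix + 1)
                  else if ix < cs.length - 2 ∧ cs.getD (ix + 2) ' ' = cs.getD ix ' ' then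
                    hasDupeLoopA cs n (ix + 1)
                  else true
                else hasDupeLoopA cs n (ix + 1)
              else false from rfl,
          if_pos hlt, List.getD_eq_getElem _ _ hix,
          List.getD_eq_getElem _ _ hix1]
      by_cases hf : ix < cs.length - 2
      · have hix2 : ix + 2 < cs.length := by omega
        have hdrop : cs.drop ix = cs[ix] :: cs[ix+1] :: cs[ix+2] :: cs.drop (ix+3) := by
          rw [List.drop_eq_getElem_cons hix, List.drop_eq_getElem_cons hix1,
              List.drop_eq_getElem_cons hix2]
        have hrec : cs.drop (ix+1) = cs[ix+1] :: cs[ix+2] :: cs.drop (ix+3) := by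
          rw [List.drop_eq_getElem_cons hix1, List.drop_eq_getElem_cons hix2]
        rw [hdrop, wLoop_cons3, List.getD_eq_getElem _ _ hix2, hIH, hrec]
        by_cases hab : cs[ix] = cs[ix+1]
        · rw [if_pos hab, if_pos hab]
          by_cases hb : ix > 0 ∧ cs.getD (ix - 1) ' ' = cs[ix]
          · rw [if_pos hb, if_pos (hback.mp hb)]
          · rw [if_neg hb, if_neg (fun h => hb (hback.mpr h))]
            by_cases hfc : cs[ix+2] = cs[ix]
            · rw [if_pos ⟨hf, hfc⟩, if_pos hfc]
            · rw [if_neg (fun h => hfc h.2), if_neg hfc]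
        · rw [if_neg hab, if_neg hab]
      · have hdrop : cs.drop ix = [cs[ix], cs[ix+1]] := by
          rw [List.drop_eq_getElem_cons hix, List.drop_eq_getElem_cons hix1,
              List.drop_eq_nil_of_le (by omega)]
        have hrec : cs.drop (ix+1) = [cs[ix+1]] := by
          rw [List.drop_eq_getElem_cons hix1, List.drop_eq_nil_of_le (by omega)]
        rw [hdrop, wLoop_cons2_nil, hIH, hrec]
        by_cases hab : cs[ix] = cs[ix+1]
        · rw [if_pos hab, if_pos hab]
          by_cases hb : ix > 0 ∧ cs.getD (ix - 1) ' ' = cs[ix]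
          · rw [if_pos hb, if_pos (hback.mp hb)]
          · rw [if_neg hb, if_neg (fun h => hb (hback.mpr h)),
                if_neg (fun h => hf h.1)]
        · rw [if_neg hab, if_neg hab]
    · rw [show hasDupeLoopA cs (n + 1) ix = if ix < cs.length - 1 then _ else false from rfl,
          if_neg hlt, wLoop_short _ _ (by simp [List.length_drop]; omega)]

-- ===== VERDICT (by name: the statement is the Claim_ definition above) =====
theorem has_dupe_spec : Claim_equal_has_dupe := by
  intro s _
  show has_dupe s = has_dupe_alt s
  unfold has_dupe has_dupe_alt
  rw [bridgeA s.toList.length s.toList 0 (by omega) (by omega),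
      if_pos (rfl : (0:Nat) = 0), List.drop_zero,
      wLoop_none_eq_gRuns, runLoopB_eq_gRuns]
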